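-- pv_equiv track=rewrite | github.com/LGeoff31/leetcode-solutions | 1196-how-many-apples-can-you-put-into-the-basket/1196. How Many Apples Can You Put into the Basket.py | maxNumberOfApples
-- ===== SOURCE A (Python) =====
-- from typing import List
--
-- def maxNumberOfApples(weight: List[int]) -> int:
--     c = 0
--     weight.sort()
--     curr = 0
--     for w in weight:
--         curr += w
--         if curr <= 5000:
--             c += 1
--         else:
--             break
--     return c
-- ===== SOURCE B (Python) =====
-- def maxNumberOfApples(weight):
--     # same in-place weight.sort() as A (caller observes the sorted list);
--     # then build the prefix-sum table once and BINARY-SEARCH it for the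
--     # cutoff: the number of prefix sums <= 5000 (valid because on the
--     # sorted list, once a prefix sum exceeds 5000 every later one does,
--     # so the predicate "prefix <= 5000" is a threshold).
--     weight.sort()
--     prefixes = []
--     s = 0
--     for w in weight:
--         s += w
--         prefixes.append(s)
--     lo, hi = 0, len(prefixes)
--     while lo < hi:
--         mid = (lo + hi) // 2
--         if 5000 < prefixes[mid]:
--             hi = mid
--         else:
--             lo = mid + 1
--     return lo
-- ===== Notes on version B (the rewrite author's own statement) =====
-- stated objective: alternative
-- what changed: Replaces A's incremental accumulate-with-early-break loop by building the prefix-sum table once and binary-searching it (bisect_right by hand) for the cutoff index, correct because on the sorted list the predicate 'prefix sum <= 5000' is a downward-closed threshold.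
import Mathlib
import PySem

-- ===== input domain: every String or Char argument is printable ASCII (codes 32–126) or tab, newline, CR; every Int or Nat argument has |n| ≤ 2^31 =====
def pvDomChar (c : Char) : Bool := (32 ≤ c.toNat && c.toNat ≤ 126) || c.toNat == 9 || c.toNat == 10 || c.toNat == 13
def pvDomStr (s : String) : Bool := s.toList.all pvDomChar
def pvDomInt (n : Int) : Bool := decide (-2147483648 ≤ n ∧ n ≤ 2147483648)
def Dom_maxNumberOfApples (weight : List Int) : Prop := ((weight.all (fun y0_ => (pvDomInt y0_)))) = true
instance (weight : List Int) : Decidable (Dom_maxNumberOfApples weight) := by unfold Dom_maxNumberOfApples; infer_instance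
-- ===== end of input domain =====

-- B builds the prefix-sum table and binary-searches it for the cutoff index
-- instead of A's early-break accumulation loop; both sort the argument in
-- place (same mutation), equal return value.


-- ===== PORT A =====
-- the 'for w in weight: curr += w; if curr <= 5000: c += 1 else: break' loop
def loopA : List Int → Int → Int → Int
  | [], c, _ => c
  | w :: t, c, curr =>
      let curr' := curr + w
      if curr' ≤ 5000 then loopA t (c + 1) curr' else c

def maxNumberOfApples (weight : List Int) : Int :=
  let ws := PySem.List.sorted weight (fun x => x) false   -- weight.sort()
  loopA ws 0 0

-- ===== PORT B =====
-- the prefix-sum building loop of Source B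
def prefixesB : List Int → Int → List Int
  | [], _ => []
  | w :: t, s => (s + w) :: prefixesB t (s + w)

-- the 'while lo < hi' binary-search loop of Source B; prefixes[mid] is always in
-- range (lo ≤ mid < hi ≤ len), so getD is exact here
def bisectB (a : List Int) (lo hi : Nat) : Nat :=
  if _h : lo < hi then
    let mid := (lo + hi) / 2
    if 5000 < a.getD mid 0 then bisectB a lo mid
    else bisectB a (mid + 1) hi
  else lo
termination_by hi - lo
decreasing_by all_goals omega

def maxNumberOfApples_alt (weight : List Int) : Int :=
  let ws := PySem.List.sorted weight (fun x => x) false   -- weight.sort()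
  let prefixes := prefixesB ws 0
  ((bisectB prefixes 0 prefixes.length : Nat) : Int)

-- ===== PRECONDITION & SPEC =====
def Spec_maxNumberOfApples (weight : List Int) (out : Int) : Prop := out = maxNumberOfApples_alt weight
instance (weight : List Int) (out : Int) : Decidable (Spec_maxNumberOfApples weight out) := by unfold Spec_maxNumberOfApples; infer_instance

-- ===== CLAIM (what is proved, stated in full; the proofs are below) =====
def Claim_equal_maxNumberOfApples : Prop := ∀ (weight : List Int), Dom_maxNumberOfApples weight → Spec_maxNumberOfApples weight (maxNumberOfApples weight)

-- ===== LEMMAS AND PROOFS =====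

-- every prefix sum over nonnegative elements stays ≥ the start value
theorem prefixesB_ge (t : List Int) (s : Int) (hpos : ∀ x ∈ t, 0 ≤ x) :
    ∀ i < (prefixesB t s).length, s ≤ (prefixesB t s).getD i 0 := by
  induction t generalizing s with
  | nil => intro i hi; simp [prefixesB] at hi
  | cons w t ih =>
      intro i hi
      have hw : 0 ≤ w := hpos w (by simp)
      cases i with
      | zero => simp [prefixesB]; omega
      | succ j =>
          simp only [prefixesB, List.length_cons, Nat.succ_lt_succ_iff] at hi
          have := ih (s + w) (fun x hx => hpos x (by simp [hx])) j hi
          simp only [prefixesB, List.getD_cons_succ]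
          omega

-- A's loop returns c + k where k is a threshold index of the prefix table
theorem loopA_threshold (t : List Int) (c curr : Int)
    (hs : t.Pairwise (· ≤ ·)) (hcurr : curr ≤ 5000) :
    ∃ k : Nat, loopA t c curr = c + (k : Int) ∧ k ≤ (prefixesB t curr).length ∧
      ∀ i < (prefixesB t curr).length,
        ((prefixesB t curr).getD i 0 ≤ 5000 ↔ i < k) := by
  induction t generalizing c curr with
  | nil => exact ⟨0, by simp [loopA, prefixesB]⟩
  | cons w t ih =>
      rcases List.pairwise_cons.mp hs with ⟨hw, ht⟩
      by_cases h : curr + w ≤ 5000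
      · obtain ⟨k, hk1, hk2, hk3⟩ := ih (c + 1) (curr + w) ht h
        refine ⟨k + 1, ?_, ?_, ?_⟩
        · simp only [loopA, h, if_true] at hk1 ⊢
          push_cast; omega
        · simpa [prefixesB] using hk2
        · intro i hi
          cases i with
          | zero => simp [prefixesB, h]
          | succ j =>
              simp only [prefixesB, List.length_cons, Nat.succ_lt_succ_iff] at hi
              simpa [prefixesB, Nat.succ_lt_succ_iff] using hk3 j hi
      · refine ⟨0, by simp [loopA, h], by omega, ?_⟩
        intro i hi
        have hwpos : 0 < w := by omega
        have hpos : ∀ x ∈ t, 0 ≤ x := fun x hx =>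
          le_of_lt (lt_of_lt_of_le hwpos (hw x hx))
        cases i with
        | zero => simp [prefixesB]; omega
        | succ j =>
            simp only [prefixesB, List.length_cons, Nat.succ_lt_succ_iff] at hi
            have := prefixesB_ge t (curr + w) hpos j hi
            simp only [prefixesB, List.getD_cons_succ]
            omega

-- binary search on a threshold table finds the threshold index
theorem bisectB_eq (a : List Int) (k : Nat)
    (hk : ∀ i < a.length, (a.getD i 0 ≤ 5000 ↔ i < k)) :
    ∀ n lo hi, hi - lo ≤ n → lo ≤ k → k ≤ hi → hi ≤ a.length →
      bisectB a lo hi = k := by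
  intro n
  induction n with
  | zero =>
      intro lo hi h1 h2 h3 h4
      have hn : ¬ lo < hi := by omega
      rw [bisectB]
      simp only [hn, dif_neg, not_false_iff]
      omega
  | succ n ih =>
      intro lo hi h1 h2 h3 h4
      rw [bisectB]
      by_cases hlt : lo < hi
      · simp only [hlt, dif_pos]
        have hmid : (lo + hi) / 2 < a.length := by omega
        have := hk ((lo + hi) / 2) hmid
        by_cases hc : 5000 < a.getD ((lo + hi) / 2) 0
        · simp only [hc, if_pos]
          exact ih lo ((lo + hi) / 2) (by omega) h2 (by omega) (by omega)
        · simp only [hc, if_neg, not_false_iff]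
          exact ih ((lo + hi) / 2 + 1) hi (by omega) (by omega) h3 h4
      · simp only [hlt, dif_neg, not_false_iff]; omega

-- ===== VERDICT (by name: the statement is the Claim_ definition above) =====
theorem maxNumberOfApples_spec : Claim_equal_maxNumberOfApples := by
  intro weight _
  unfold Spec_maxNumberOfApples maxNumberOfApples maxNumberOfApples_alt
  have hs : (PySem.List.sorted weight (fun x => x) false).Pairwise (· ≤ ·) :=
    PySem.List.sorted_pairwise weight (fun x => x)
  obtain ⟨k, hk1, hk2, hk3⟩ :=
    loopA_threshold (PySem.List.sorted weight (fun x => x) false) 0 0 hs (by norm_num)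
  have hb := bisectB_eq (prefixesB (PySem.List.sorted weight (fun x => x) false) 0) k hk3
    (prefixesB (PySem.List.sorted weight (fun x => x) false) 0).length 0
    (prefixesB (PySem.List.sorted weight (fun x => x) false) 0).length
    (by omega) (by omega) hk2 le_rfl
  rw [hk1]
  show 0 + (k : Int) =
    ((bisectB (prefixesB (PySem.List.sorted weight (fun x => x) false) 0) 0
      (prefixesB (PySem.List.sorted weight (fun x => x) false) 0).length : Nat) : Int)
  rw [hb]
  ring
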